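-- pv_equiv track=rewrite | github.com/ionescucosti/courses | Sedinta4/Cap4_55_T41.py | countEachType
-- ===== SOURCE A (Python) =====
-- def countEachType(text):
--     numbers=0
--     spaces=0
--     chars=0
--     for i in text:
--         if i.isdigit():
--             numbers +=1
--             chars += 1
--         elif i == ' ':
--             spaces += 1
--             chars += 1
--         else:
--             chars += 1
--
--     return 'numere: ',numbers,' spatii: ',spaces,' in total: ',chars
-- ===== SOURCE B (Python) =====
-- def countEachType(text):
--     # three independent passes instead of one fused counting loop
--     numbers = sum(c.isdigit() for c in text)
--     spaces = sum(c == ' ' for c in text)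
--     total = len(text)
--     return 'numere: ', numbers, ' spatii: ', spaces, ' in total: ', total
-- ===== Notes on version B (the rewrite author's own statement) =====
-- stated objective: idiomatic
-- what changed: Replaces the single fused three-counter branch loop by three independent passes (digit count, space count, len), using that chars is incremented in every branch so it equals len(text).
import Mathlib
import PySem

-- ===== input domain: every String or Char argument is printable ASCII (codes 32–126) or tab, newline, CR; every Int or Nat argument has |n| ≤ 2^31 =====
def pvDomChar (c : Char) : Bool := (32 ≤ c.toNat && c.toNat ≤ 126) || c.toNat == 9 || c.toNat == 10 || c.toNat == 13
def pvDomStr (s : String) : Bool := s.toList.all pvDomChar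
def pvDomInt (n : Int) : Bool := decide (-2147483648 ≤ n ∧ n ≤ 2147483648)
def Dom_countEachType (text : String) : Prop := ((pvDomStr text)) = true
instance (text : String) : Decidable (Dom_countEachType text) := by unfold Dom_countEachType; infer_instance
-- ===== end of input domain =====

-- B replaces A's single fused three-counter loop by three independent passes (digits, spaces, len); idiomatic, same cost.

-- ===== PORT A =====
def countEachType (text : String) : String × Int × String × Int × String × Int :=
  let r : Int × Int × Int :=
    text.toList.foldl (fun (acc : Int × Int × Int) i =>
      if PySem.Chars.isdigit i then (acc.1 + 1, acc.2.1, acc.2.2 + 1)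
      else if i == ' ' then (acc.1, acc.2.1 + 1, acc.2.2 + 1)
      else (acc.1, acc.2.1, acc.2.2 + 1)) (0, 0, 0)
  ("numere: ", r.1, " spatii: ", r.2.1, " in total: ", r.2.2)

-- ===== PORT B =====
def countEachType_alt (text : String) : String × Int × String × Int × String × Int :=
  ("numere: ", (text.toList.countP PySem.Chars.isdigit : Int),
   " spatii: ", (text.toList.countP (fun c => c == ' ') : Int),
   " in total: ", PySem.Str.len text)

-- ===== PRECONDITION & SPEC =====
def Spec_countEachType (text : String) (out : String × Int × String × Int × String × Int) : Prop := out = countEachType_alt text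
instance (text : String) (out : String × Int × String × Int × String × Int) : Decidable (Spec_countEachType text out) := by unfold Spec_countEachType; infer_instance

-- ===== CLAIM (what is proved, stated in full; the proofs are below) =====
def Claim_equal_countEachType : Prop := ∀ (text : String), Dom_countEachType text → Spec_countEachType text (countEachType text)

-- ===== LEMMAS AND PROOFS =====

theorem countEachType_fold (l : List Char) (a b c : Int) :
    l.foldl (fun (acc : Int × Int × Int) i =>
      if PySem.Chars.isdigit i then (acc.1 + 1, acc.2.1, acc.2.2 + 1)
      else if i == ' ' then (acc.1, acc.2.1 + 1, acc.2.2 + 1)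
      else (acc.1, acc.2.1, acc.2.2 + 1)) (a, b, c)
    = (a + (l.countP PySem.Chars.isdigit : Int),
       b + (l.countP (fun ch => ch == ' ') : Int),
       c + (l.length : Int)) := by
  induction l generalizing a b c with
  | nil => simp
  | cons hd tl ih =>
    rw [List.foldl_cons]
    by_cases h1 : PySem.Chars.isdigit hd = true
    · have hne : (hd == ' ') = false := by
        cases hbe : (hd == ' ')
        · rfl
        · exfalso
          have : hd = ' ' := by simpa using hbe
          subst this
          simp [PySem.Chars.isdigit] at h1
      rw [if_pos h1, ih]
      simp [h1, hne]
      omega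
    · rw [if_neg h1]
      by_cases h2 : (hd == ' ') = true
      · rw [if_pos h2, ih]
        simp [h1, h2]
        omega
      · rw [if_neg h2, ih]
        simp [h1, h2]
        omega

-- ===== VERDICT (by name: the statement is the Claim_ definition above) =====
theorem countEachType_spec : Claim_equal_countEachType := by
  intro text _
  unfold Spec_countEachType countEachType countEachType_alt
  rw [countEachType_fold]
  simp [PySem.Str.len]
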